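-- pv_equiv track=rewrite | github.com/MII-Cybersec/pythonidae-challenge | algorithm/string/string.py | chall02
-- ===== SOURCE A (Python) =====
-- def chall02(D: str, S: int, E: int) -> str:
--   newStr = ''
--   for idx in range(len(D)):
--     if S <= idx <= E:
--       newStr += 'x'
--     else:
--       newStr += D[idx]
--   return newStr
-- ===== SOURCE B (Python) =====
-- def chall02(D: str, S: int, E: int) -> str:
--   lo = max(S, 0)
--   hi = min(E, len(D) - 1)
--   if lo <= hi:
--     return D[:lo] + 'x' * (hi - lo + 1) + D[hi + 1:]
--   return D
-- ===== Notes on version B (the rewrite author's own statement) =====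
-- stated objective: idiomatic
-- what changed: Replaces the per-index loop with repeated string concatenation by clamped bounds plus slice concatenation: D[:lo] + 'x'*(hi-lo+1) + D[hi+1:].
import Mathlib
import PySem

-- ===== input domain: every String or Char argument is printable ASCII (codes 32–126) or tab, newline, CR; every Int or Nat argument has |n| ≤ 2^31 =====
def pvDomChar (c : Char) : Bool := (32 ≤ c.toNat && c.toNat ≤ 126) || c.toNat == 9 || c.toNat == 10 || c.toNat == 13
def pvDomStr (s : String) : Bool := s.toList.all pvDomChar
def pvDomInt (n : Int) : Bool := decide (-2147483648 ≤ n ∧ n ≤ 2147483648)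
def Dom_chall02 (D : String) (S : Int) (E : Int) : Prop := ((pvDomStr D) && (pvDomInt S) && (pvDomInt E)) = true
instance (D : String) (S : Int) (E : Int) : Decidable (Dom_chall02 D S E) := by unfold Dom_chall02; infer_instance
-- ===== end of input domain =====

-- B replaces the per-index loop with clamped bounds plus slice concatenation (same return value).


-- ===== PORT A =====
-- for idx in range(len(D)): newStr += 'x' if S <= idx <= E else D[idx]
def chall02 (D : String) (S : Int) (E : Int) : String :=
  String.ofList ((List.range D.toList.length).foldl
    (fun acc (idx : Nat) =>
      acc ++ (if S ≤ (idx : Int) ∧ (idx : Int) ≤ E then ['x'] else [D.toList.getD idx 'x'])) [])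

-- ===== PORT B =====
-- lo = max(S,0); hi = min(E, len(D)-1); if lo <= hi: D[:lo] + 'x'*(hi-lo+1) + D[hi+1:] else D
def chall02_alt (D : String) (S : Int) (E : Int) : String :=
  let l := D.toList
  let lo := max S 0
  let hi := min E ((l.length : Int) - 1)
  if lo ≤ hi then
    String.ofList (l.take lo.toNat ++ (List.replicate (hi - lo + 1).toNat 'x' ++ l.drop (hi.toNat + 1)))
  else D

-- ===== PRECONDITION & SPEC =====
def Spec_chall02 (D : String) (S : Int) (E : Int) (out : String) : Prop := out = chall02_alt D S E
instance (D : String) (S : Int) (E : Int) (out : String) : Decidable (Spec_chall02 D S E out) := by unfold Spec_chall02; infer_instance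

-- ===== CLAIM (what is proved, stated in full; the proofs are below) =====
def Claim_equal_chall02 : Prop := ∀ (D : String) (S : Int) (E : Int), Dom_chall02 D S E → Spec_chall02 D S E (chall02 D S E)

-- ===== LEMMAS AND PROOFS =====

-- A's loop is a map of the masking function over the index range
theorem chall02_loop_eq_map (l : List Char) (S E : Int) :
    (List.range l.length).foldl
      (fun acc (idx : Nat) =>
        acc ++ (if S ≤ (idx : Int) ∧ (idx : Int) ≤ E then ['x'] else [l.getD idx 'x'])) []
    = (List.range l.length).map
        (fun (idx : Nat) => if S ≤ (idx : Int) ∧ (idx : Int) ≤ E then 'x' else l.getD idx 'x') := by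
  simp only [← apply_ite (fun c => [c])]
  exact (PySem.List.foldl_append_singleton_eq_map _ _ []).trans (List.nil_append _)

-- pointwise value of B's three-piece concatenation, for a ≤ b < l.length
theorem slice_getElem (l : List Char) (a b : Nat) (ha : a ≤ b) (hb : b < l.length)
    (i : Nat) (hi : i < l.length) :
    (l.take a ++ (List.replicate (b - a + 1) 'x' ++ l.drop (b + 1)))[i]'(by
      simp [List.length_take, List.length_replicate, List.length_drop]; omega)
    = if a ≤ i ∧ i ≤ b then 'x' else l[i] := by
  by_cases h1 : i < a
  · rw [List.getElem_append_left (by simp [List.length_take]; omega)]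
    simp [List.getElem_take]
    omega
  · rw [List.getElem_append_right (by simp [List.length_take]; omega)]
    by_cases h2 : i ≤ b
    · rw [List.getElem_append_left (by simp [List.length_take, List.length_replicate]; omega)]
      simp [List.getElem_replicate]
      omega
    · have ht : (l.take a).length = a := by simp; omega
      rw [List.getElem_append_right (by simp [ht, List.length_replicate]; omega)]
      rw [List.getElem_drop, if_neg (by omega)]
      congr 1
      simp [ht, List.length_replicate]
      omega

theorem chall02_lists_eq (l : List Char) (S E : Int) :
    String.ofList ((List.range l.length).map
      (fun (idx : Nat) => if S ≤ (idx : Int) ∧ (idx : Int) ≤ E then 'x' else l.getD idx 'x'))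
    = chall02_alt (String.ofList l) S E := by
  unfold chall02_alt
  simp only [String.toList_ofList]
  set lo := max S 0 with hlo
  set hi := min E ((l.length : Int) - 1) with hhi
  by_cases h : lo ≤ hi
  · rw [if_pos h]
    have h0lo : 0 ≤ lo := le_max_right S 0
    have ha : (lo.toNat : Int) = lo := Int.toNat_of_nonneg h0lo
    have hb : (hi.toNat : Int) = hi := Int.toNat_of_nonneg (le_trans h0lo h)
    have hbn : hi.toNat < l.length := by
      have := min_le_right E ((l.length : Int) - 1); omega
    have hab : lo.toNat ≤ hi.toNat := by omega
    have hm : (hi - lo + 1).toNat = hi.toNat - lo.toNat + 1 := by omega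
    refine congrArg String.ofList (List.ext_getElem (by
      simp [List.length_take, List.length_replicate, List.length_drop]; omega) ?_)
    intro i hin hin'
    have hi' : i < l.length := by simpa using hin
    rw [List.getElem_map, List.getElem_range]
    simp only [hm]
    rw [slice_getElem l lo.toNat hi.toNat hab hbn i hi']
    have hcond : (S ≤ (i : Int) ∧ (i : Int) ≤ E) ↔ (lo.toNat ≤ i ∧ i ≤ hi.toNat) := by
      rw [hlo, hhi] at *
      constructor
      · intro ⟨h1, h2⟩
        constructor <;> omega
      · intro ⟨h1, h2⟩
        constructor <;> omega
    by_cases hc : S ≤ (i : Int) ∧ (i : Int) ≤ E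
    · rw [if_pos hc, if_pos (hcond.mp hc)]
    · rw [if_neg hc, if_neg (fun hx => hc (hcond.mpr hx)), List.getD_eq_getElem l 'x' hi']
  · rw [if_neg h]
    refine congrArg String.ofList (List.ext_getElem (by simp) ?_)
    intro i hin hin'
    have hi' : i < l.length := by simpa using hin
    rw [List.getElem_map, List.getElem_range]
    have hc : ¬ (S ≤ (i : Int) ∧ (i : Int) ≤ E) := by
      rintro ⟨h1, h2⟩
      apply h
      rw [hlo, hhi]
      omega
    rw [if_neg hc, List.getD_eq_getElem l 'x' hi']

-- ===== VERDICT (by name: the statement is the Claim_ definition above) =====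
theorem chall02_spec : Claim_equal_chall02 := by
  intro D S E _
  unfold Spec_chall02 chall02
  rw [chall02_loop_eq_map]
  have := chall02_lists_eq D.toList S E
  rwa [String.ofList_toList] at this
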